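-- pv_equiv track=rewrite | github.com/lightadrift/document-extraction | server/mimi.py | mimi_sequence_slow
-- ===== SOURCE A (Python) =====
-- def mimi_sequence_slow(n: int):
--     if n==1:
--         return [1,1]
--     sequence = [1,1]
--     for step in range(2, n+1):
--         new_sequence = []
--         new_sequence.append(sequence[0])
--         for i in range(len(sequence)-1):
--             element = sequence[i] + sequence[i+1]
--             new_sequence.append(element)
--             new_sequence.append(sequence[i+1])
--         sequence = new_sequence
--     return sequence
-- ===== SOURCE B (Python) =====
-- def mimi_sequence_slow(n: int):
--     # Row n of the mediant construction equals Stern's diatomic sequence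
--     # fusc on the index range [2**(n-1), 2**n]; build the fusc table bottom-up
--     # by index and slice it, instead of rebuilding the row n-1 times.
--     if n < 2:
--         return [1, 1]
--     half = 2 ** (n - 1)
--     f = [0] * (2 * half + 1)   # f[i] = fusc(i)
--     f[1] = 1
--     for k in range(1, half + 1):
--         f[2 * k] = f[k]
--         if 2 * k + 1 <= 2 * half:
--             f[2 * k + 1] = f[k] + f[k + 1]
--     return f[half:]
-- ===== Notes on version B (the rewrite author's own statement) =====
-- stated objective: alternative
-- what changed: Replaces the iterative mediant-insertion rebuild of the whole row n-1 times by a direct construction: the row equals Stern's diatomic sequence fusc on [2^(n-1), 2^n], built as a flat bottom-up index table and sliced.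
import Mathlib
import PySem

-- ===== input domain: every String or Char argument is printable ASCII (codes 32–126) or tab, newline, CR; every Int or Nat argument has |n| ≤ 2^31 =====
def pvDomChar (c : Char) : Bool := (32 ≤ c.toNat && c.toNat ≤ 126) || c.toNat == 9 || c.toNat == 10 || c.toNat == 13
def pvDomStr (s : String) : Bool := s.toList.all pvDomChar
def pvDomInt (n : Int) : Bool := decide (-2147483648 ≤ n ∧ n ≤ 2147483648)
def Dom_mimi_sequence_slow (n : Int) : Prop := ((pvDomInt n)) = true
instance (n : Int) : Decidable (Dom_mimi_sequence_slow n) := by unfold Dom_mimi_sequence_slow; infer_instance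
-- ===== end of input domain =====

-- B replaces A's repeated mediant-insertion rebuild of the row by a direct
-- closed-form construction via Stern's diatomic sequence (fusc); alternative
-- decomposition, same asymptotic cost.

-- ===== PORT A =====
-- one pass of A's inner loop; list indices are always in range here, so the
-- getD default 0 is never used
def stepA (s : List Int) : List Int :=
  (PySem.List.pyRange 0 ((s.length : Int) - 1) 1).foldl
    (fun acc i =>
      (acc ++ [PySem.List.pyGetD s i 0 + PySem.List.pyGetD s (i + 1) 0])
        ++ [PySem.List.pyGetD s (i + 1) 0])
    [PySem.List.pyGetD s 0 0]

def mimi_sequence_slow (n : Int) : List Int :=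
  if n = 1 then [1, 1]
  else (PySem.List.pyRange 2 (n + 1) 1).foldl (fun s _ => stepA s) [1, 1]

-- ===== PORT B =====
def mimi_sequence_slow_alt (n : Int) : List Int :=
  if n < 2 then [1, 1]
  else
    let half := 2 ^ (n - 1).toNat
    let f0 := (List.replicate (2 * half + 1) (0 : Int)).set 1 1
    let f := (List.range' 1 half).foldl
      (fun f k =>
        let f1 := f.set (2 * k) (f.getD k 0)
        if 2 * k + 1 ≤ 2 * half then
          f1.set (2 * k + 1) (f1.getD k 0 + f1.getD (k + 1) 0)
        else f1) f0
    f.drop half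

-- ===== PRECONDITION & SPEC =====
def Spec_mimi_sequence_slow (n : Int) (out : List Int) : Prop := out = mimi_sequence_slow_alt n
instance (n : Int) (out : List Int) : Decidable (Spec_mimi_sequence_slow n out) := by unfold Spec_mimi_sequence_slow; infer_instance

-- ===== CLAIM (what is proved, stated in full; the proofs are below) =====
def Claim_equal_mimi_sequence_slow : Prop := ∀ (n : Int), Dom_mimi_sequence_slow n → Spec_mimi_sequence_slow n (mimi_sequence_slow n)

-- ===== LEMMAS AND PROOFS =====

-- Stern's diatomic sequence (proof-side characterisation of both programs)
def fuscB (m : Nat) : Int :=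
  if m < 2 then (m : Int)
  else if m % 2 = 0 then fuscB (m / 2)
  else fuscB (m / 2) + fuscB (m / 2 + 1)
decreasing_by all_goals omega

theorem fuscB_zero : fuscB 0 = 0 := by simp [fuscB]

-- row after m doubling steps: fusc values on [2^m, 2^(m+1)]
def rowF (m : Nat) : List Int :=
  (List.range (2 ^ m + 1)).map (fun i => fuscB (2 ^ m + i))

theorem fuscB_one : fuscB 1 = 1 := by simp [fuscB]

theorem fuscB_even (k : Nat) : fuscB (2 * k) = fuscB k := by
  rcases Nat.eq_zero_or_pos k with h | h
  · subst h; simp [fuscB]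
  · rw [fuscB]
    have h2 : ¬ 2 * k < 2 := by omega
    simp [h2, Nat.mul_div_cancel_left k (by norm_num : 0 < 2), Nat.mul_mod_right]

theorem fuscB_odd (k : Nat) : fuscB (2 * k + 1) = fuscB k + fuscB (k + 1) := by
  rcases Nat.eq_zero_or_pos k with h | h
  · subst h; simp [fuscB]
  · rw [fuscB]
    have h2 : ¬ 2 * k + 1 < 2 := by omega
    have hm : (2 * k + 1) % 2 = 1 := by omega
    have hd : (2 * k + 1) / 2 = k := by omega
    simp [h2, hm, hd]

-- the inner fold, with list indexing resolved through h, as a flatMap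
theorem foldl_idx (s : List Int) (f : Nat → Int) (init : List Int) (L : Nat)
    (h : ∀ k, k ≤ L → PySem.List.pyGetD s (k : Int) 0 = f k) :
    (List.range L).foldl
      (fun acc (k : Nat) =>
        (acc ++ [PySem.List.pyGetD s (k : Int) 0 + PySem.List.pyGetD s ((k : Int) + 1) 0])
          ++ [PySem.List.pyGetD s ((k : Int) + 1) 0]) init
      = init ++ (List.range L).flatMap (fun k => [f k + f (k + 1), f (k + 1)]) := by
  induction L with
  | zero => simp
  | succ L ih =>
    have hL : PySem.List.pyGetD s ((L : Int)) 0 = f L := h L (by omega)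
    have hL1 : PySem.List.pyGetD s ((L : Int) + 1) 0 = f (L + 1) := by
      have := h (L + 1) (le_refl _); push_cast at this; exact this
    rw [List.range_succ, List.foldl_append, ih (fun k hk => h k (by omega))]
    simp only [List.foldl_cons, List.foldl_nil]
    rw [hL, hL1]
    simp [List.flatMap_append]

-- fusc's defining recurrences refine one row to the next
theorem flatMap_row (a L : Nat) :
    [fuscB a] ++ (List.range L).flatMap
        (fun k => [fuscB (a + k) + fuscB (a + k + 1), fuscB (a + k + 1)])
      = (List.range (2 * L + 1)).map (fun i => fuscB (2 * a + i)) := by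
  induction L with
  | zero => simp [(by rw [← fuscB_even a] : fuscB a = fuscB (2 * a))]
  | succ L ih =>
    have e1 : fuscB (a + L) + fuscB (a + L + 1) = fuscB (2 * a + (2 * L + 1)) := by
      have := fuscB_odd (a + L); rw [(by ring : 2 * (a + L) + 1 = 2 * a + (2 * L + 1))] at this
      omega
    have e2 : fuscB (a + L + 1) = fuscB (2 * a + (2 * L + 2)) := by
      have := fuscB_even (a + L + 1); rw [(by ring : 2 * (a + L + 1) = 2 * a + (2 * L + 2))] at this
      omega
    have hr : 2 * (L + 1) + 1 = (2 * L + 1) + 1 + 1 := by ring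
    rw [hr, List.range_succ, List.range_succ, List.range_succ]
    simp only [List.flatMap_append, List.flatMap_cons, List.flatMap_nil, List.map_append,
      List.map_cons, List.map_nil, ← List.append_assoc, ih, e2]
    simp
    omega

theorem stepA_map (a L : Nat) :
    stepA ((List.range (L + 1)).map (fun i => fuscB (a + i)))
      = (List.range (2 * L + 1)).map (fun i => fuscB (2 * a + i)) := by
  have hidx : ∀ k : Nat, k ≤ L →
      PySem.List.pyGetD ((List.range (L + 1)).map (fun i => fuscB (a + i))) (k : Int) 0
        = fuscB (a + k) := by
    intro k hk
    rw [PySem.List.pyGetD_natCast]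
    simp [List.getD_eq_getElem?_getD, Nat.lt_succ_of_le hk]
  unfold stepA
  simp only [List.length_map, List.length_range]
  have hr : ((L + 1 : Nat) : Int) - 1 = (L : Nat) := by push_cast; ring
  rw [hr, PySem.List.pyRange_zero_natCast, List.foldl_map]
  have h0 : PySem.List.pyGetD ((List.range (L + 1)).map (fun i => fuscB (a + i))) (0 : Int) 0
      = fuscB a := by
    have := hidx 0 (by omega); push_cast at this; simpa using this
  rw [h0, foldl_idx _ (fun k => fuscB (a + k)) [fuscB a] L hidx]
  have h := flatMap_row a L
  simp only [show (fun (k : Nat) => [fuscB (a + k) + fuscB (a + (k + 1)), fuscB (a + (k + 1))])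
      = fun k => [fuscB (a + k) + fuscB (a + k + 1), fuscB (a + k + 1)] from by
    funext k; rw [Nat.add_assoc]]
  exact h

theorem stepA_row (m : Nat) : stepA (rowF m) = rowF (m + 1) := by
  obtain ⟨p, hp⟩ : ∃ p, 2 ^ m = p + 1 :=
    ⟨2 ^ m - 1, by have := Nat.one_le_two_pow (n := m); omega⟩
  have h2 : 2 ^ (m + 1) = 2 * (p + 1) := by rw [pow_succ, hp]; ring
  unfold rowF
  rw [hp, h2]
  exact stepA_map (p + 1) (p + 1)

theorem fold_rows (m : Nat) :
    (PySem.List.pyRange 2 ((m : Int) + 2) 1).foldl (fun s _ => stepA s) [1, 1] = rowF m := by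
  induction m with
  | zero =>
    rw [PySem.List.pyRange_one_eq_nil (by omega)]
    have h2 : fuscB 2 = 1 := by rw [show (2 : Nat) = 2 * 1 from rfl, fuscB_even, fuscB_one]
    simp [rowF, List.range_succ, fuscB_one, h2]
  | succ m ih =>
    have : ((m : Int) + 1) + 2 = ((m : Int) + 2) + 1 := by ring
    rw [show (((m + 1 : Nat) : Int) + 2) = ((m : Int) + 2) + 1 by push_cast; ring]
    rw [PySem.List.pyRange_one_succ_right (by omega)]
    rw [List.foldl_append, ih]
    simpa using stepA_row m


-- ===== B-side: the bottom-up table equals fusc =====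

-- the table after caps: entries up to index B filled with fusc, rest still 0
def capF (half B : Nat) : List Int :=
  (List.range (2 * half + 1)).map (fun i => if i ≤ B then fuscB i else 0)

theorem getD_map_range_int (f : Nat → Int) (m j : Nat) (hj : j < m) :
    ((List.range m).map f).getD j 0 = f j := by
  simp [List.getD_eq_getElem?_getD, hj]

theorem set_map_range (f : Nat → Int) (m j : Nat) (v : Int) :
    ((List.range m).map f).set j v
      = (List.range m).map (fun i => if i = j then v else f i) := by
  apply List.ext_getElem
  · simp
  · intro i h1 h2
    simp only [List.getElem_set, List.getElem_map, List.getElem_range]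
    simp only [List.length_set, List.length_map, List.length_range] at h1
    by_cases h : j = i
    · simp [h]
    · have h' : ¬ i = j := fun hh => h hh.symm
      simp [h, h']

theorem map_range_congr (f g : Nat → Int) (m : Nat) (h : ∀ i, i < m → f i = g i) :
    (List.range m).map f = (List.range m).map g :=
  List.map_congr_left (fun i hi => h i (List.mem_range.mp hi))

theorem f0_eq (half : Nat) :
    (List.replicate (2 * half + 1) (0 : Int)).set 1 1 = capF half 1 := by
  apply List.ext_getElem
  · simp [capF]
  · intro i h1 h2
    simp only [List.length_set, List.length_replicate] at h1
    simp only [List.getElem_set, List.getElem_replicate, capF, List.getElem_map,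
      List.getElem_range]
    rcases Nat.lt_or_ge i 2 with h | h
    · interval_cases i <;> simp [fuscB_zero, fuscB_one]
    · have : ¬ (1 = i) := by omega
      have : ¬ (i ≤ 1) := by omega
      simp_all

theorem stepCap (half K : Nat) (hK : K + 1 ≤ half) :
    (fun (f : List Int) (k : Nat) =>
        let f1 := f.set (2 * k) (f.getD k 0)
        if 2 * k + 1 ≤ 2 * half then
          f1.set (2 * k + 1) (f1.getD k 0 + f1.getD (k + 1) 0)
        else f1) (capF half (2 * K + 1)) (K + 1)
      = capF half (2 * K + 3) := by
  simp only
  have hr1 : (capF half (2 * K + 1)).getD (K + 1) 0 = fuscB (K + 1) := by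
    unfold capF
    rw [getD_map_range_int _ _ _ (by omega)]
    simp [show K + 1 ≤ 2 * K + 1 from by omega]
  rw [hr1]
  have hf1 : (capF half (2 * K + 1)).set (2 * (K + 1)) (fuscB (K + 1))
      = capF half (2 * K + 2) := by
    unfold capF
    rw [set_map_range]
    apply map_range_congr
    intro i hi
    by_cases h : i = 2 * (K + 1)
    · subst h
      rw [if_pos rfl, if_pos (by omega)]
      rw [show 2 * (K + 1) = 2 * (K + 1) from rfl, fuscB_even]
    · rw [if_neg h]
      by_cases h2 : i ≤ 2 * K + 1
      · rw [if_pos h2, if_pos (by omega)]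
      · rw [if_neg h2, if_neg (by omega)]
  rw [hf1]
  by_cases hg : 2 * (K + 1) + 1 ≤ 2 * half
  · rw [if_pos hg]
    have hrk : (capF half (2 * K + 2)).getD (K + 1) 0 = fuscB (K + 1) := by
      unfold capF
      rw [getD_map_range_int _ _ _ (by omega)]
      simp [show K + 1 ≤ 2 * K + 2 from by omega]
    have hrk1 : (capF half (2 * K + 2)).getD (K + 2) 0 = fuscB (K + 2) := by
      unfold capF
      rw [getD_map_range_int _ _ _ (by omega)]
      simp [show K + 2 ≤ 2 * K + 2 from by omega]
    rw [hrk, hrk1]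
    unfold capF
    rw [set_map_range]
    apply map_range_congr
    intro i hi
    by_cases h : i = 2 * (K + 1) + 1
    · subst h
      rw [if_pos rfl, if_pos (by omega)]
      have h3 := fuscB_odd (K + 1)
      simp only [show K + 1 + 1 = K + 2 from by omega] at h3
      exact h3.symm
    · rw [if_neg h]
      by_cases h2 : i ≤ 2 * K + 2
      · rw [if_pos h2, if_pos (by omega)]
      · rw [if_neg h2, if_neg (by omega)]
  · rw [if_neg hg]
    unfold capF
    apply map_range_congr
    intro i hi
    by_cases h2 : i ≤ 2 * K + 2
    · rw [if_pos h2, if_pos (by omega)]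
    · rw [if_neg h2, if_neg (by omega)]

theorem loop_eq (half K : Nat) (hK : K ≤ half) :
    (List.range' 1 K).foldl
      (fun (f : List Int) (k : Nat) =>
        let f1 := f.set (2 * k) (f.getD k 0)
        if 2 * k + 1 ≤ 2 * half then
          f1.set (2 * k + 1) (f1.getD k 0 + f1.getD (k + 1) 0)
        else f1) (capF half 1)
      = capF half (2 * K + 1) := by
  induction K with
  | zero => simp [List.range']
  | succ K ih =>
    rw [List.range'_concat, List.foldl_append, ih (by omega)]
    have := stepCap half K (by omega)
    simpa [show 1 + K = K + 1 from by omega] using this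

theorem capF_full (half : Nat) :
    capF half (2 * half + 1) = (List.range (2 * half + 1)).map fuscB := by
  unfold capF
  apply map_range_congr
  intro i hi
  rw [if_pos (by omega)]

theorem drop_map_range (f : Nat → Int) (a b : Nat) :
    (((List.range (a + b)).map f).drop a) = (List.range b).map (fun i => f (a + i)) := by
  apply List.ext_getElem
  · simp
  · intro i h1 h2
    simp

-- ===== VERDICT (by name: the statement is the Claim_ definition above) =====
theorem mimi_sequence_slow_spec : Claim_equal_mimi_sequence_slow := by
  intro n _
  unfold Spec_mimi_sequence_slow mimi_sequence_slow mimi_sequence_slow_alt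
  by_cases h2 : n < 2
  · have h1 : ¬ (n = 1) ∨ n = 1 := by omega
    rcases h1 with h1 | h1
    · simp only [h1, if_false, if_pos h2]
      rw [PySem.List.pyRange_one_eq_nil (by omega)]
      rfl
    · simp [h1]
  · have h1 : ¬ (n = 1) := by omega
    have hge : 2 ≤ n := by omega
    have hm : n + 1 = (((n - 1).toNat : Nat) : Int) + 2 := by omega
    simp only [h1, h2, if_false]
    rw [hm, fold_rows]
    rw [f0_eq, loop_eq _ _ (le_refl _), capF_full,
      show 2 * 2 ^ (n - 1).toNat + 1 = 2 ^ (n - 1).toNat + (2 ^ (n - 1).toNat + 1) from by ring,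
      drop_map_range]
    rfl
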